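-- pv_equiv track=rewrite | github.com/Alyne-0/ConfigManagement2 | main.py | dfs_prune_by_filter
-- ===== SOURCE A (Python) =====
-- from collections import defaultdict, deque
-- from typing import Dict, List, Set, Tuple
--
-- Graph = Dict[str, Set[str]]
--
-- def dfs_prune_by_filter(g: Graph, start: str, flt: str) -> Graph:
--     """Обходит граф DFS с учетом игнора по подстроке; возвращает подграф достижимых узлов."""
--     flt_low = (flt or "").lower()
--     out: Graph = defaultdict(set)
--     visited: Set[str] = set()
--
--     def dfs(u: str):
--         if u in visited:
--             return
--         if flt_low and flt_low in u.lower():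
--             return
--         visited.add(u)
--         for v in g.get(u, ()):
--             if flt_low and flt_low in v.lower():
--                 continue
--             out[u].add(v)
--             dfs(v)
--
--     dfs(start)
--     return out
-- ===== SOURCE B (Python) =====
-- from collections import defaultdict
--
--
-- def dfs_prune_by_filter(g, start, flt):
--     """Iterative (explicit-stack) DFS over the filtered graph; no recursion."""
--     flt_low = (flt or "").lower()
--     out = defaultdict(set)
--     if flt_low and flt_low in start.lower():
--         return out
--     visited = set()
--     stack = [start]
--     while stack:
--         u = stack.pop()
--         if u in visited:
--             continue
--         visited.add(u)
--         survivors = [v for v in g.get(u, ()) if not (flt_low and flt_low in v.lower())]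
--         if survivors:
--             out[u].update(survivors)
--             # pop() takes the last item, so push reversed to keep left-to-right DFS order
--             stack.extend(reversed(survivors))
--     return out
-- ===== Notes on version B (the rewrite author's own statement) =====
-- stated objective: alternative
-- what changed: The recursive DFS with interleaved per-edge output updates is replaced by an iterative explicit-stack DFS that, per visited node, filters its neighbours once, records all surviving edges in one batched set update, and pushes the survivors onto the stack; no recursion and no per-edge repeated filter test.
import Mathlib
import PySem

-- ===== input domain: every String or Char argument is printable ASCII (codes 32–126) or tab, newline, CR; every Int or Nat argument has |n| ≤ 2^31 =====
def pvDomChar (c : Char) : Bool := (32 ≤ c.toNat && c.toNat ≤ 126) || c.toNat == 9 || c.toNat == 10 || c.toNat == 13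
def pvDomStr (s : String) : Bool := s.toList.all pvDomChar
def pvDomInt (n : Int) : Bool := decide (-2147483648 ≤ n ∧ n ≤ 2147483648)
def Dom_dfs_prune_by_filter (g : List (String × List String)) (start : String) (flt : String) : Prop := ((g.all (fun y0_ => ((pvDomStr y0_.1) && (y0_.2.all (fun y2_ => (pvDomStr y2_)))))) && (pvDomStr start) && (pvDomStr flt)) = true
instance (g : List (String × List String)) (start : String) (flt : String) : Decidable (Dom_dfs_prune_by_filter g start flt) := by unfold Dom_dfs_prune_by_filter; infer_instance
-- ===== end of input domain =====

-- B replaces A's recursive DFS by an iterative explicit-stack DFS with per-node batched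
-- output updates (objective: alternative decomposition, same asymptotic cost).

-- ===== PORT A =====
-- 'flt_low and flt_low in u.lower()' (both Pythons use this very test)
def pvMatch (fl : List Char) (u : String) : Bool :=
  !fl.isEmpty && PySem.Chars.isIn fl (PySem.Chars.lower u.toList)

-- 'g.get(u, ())'
def pvAdj (g : List (String × List String)) (u : String) : List String :=
  PySem.Dict.getD (PySem.Dict.mk g) u []

-- 'out[u].add(v)' on a defaultdict(set)
def pvAddE (d : PySem.Dict String (List String)) (u v : String) :
    PySem.Dict String (List String) :=
  PySem.Dict.modify d u [] (fun s => PySem.Set.add s v)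

-- the inner recursive 'def dfs(u)' of A, made total by a Nat fuel (the fuel below
-- strictly exceeds the number of nodes the recursion can ever mark visited, so the
-- 0-case is never the value-determining branch)
def pvDfsA (g : List (String × List String)) (fl : List Char) :
    Nat → PySem.Set String × PySem.Dict String (List String) → String →
    PySem.Set String × PySem.Dict String (List String)
  | 0, st, _ => st
  | n+1, st, u =>
    if PySem.Set.contains st.1 u then st
    else if pvMatch fl u then st
    else
      (pvAdj g u).foldl
        (fun st' v =>
          if pvMatch fl v then st'
          else pvDfsA g fl n (st'.1, pvAddE st'.2 u v) v)
        (PySem.Set.add st.1 u, st.2)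

-- all nodes the traversal can ever visit: start plus every neighbour in g
def pvUniv (g : List (String × List String)) (start : String) : List String :=
  PySem.Set.ofList (start :: g.flatMap (fun p => p.2))

def pvFuelA (g : List (String × List String)) (start : String) : Nat :=
  (pvUniv g start).length + 1

def dfs_prune_by_filter (g : List (String × List String)) (start : String) (flt : String) :
    List (String × List String) :=
  -- flt_low = (flt or "").lower()  ('flt or ""' is flt itself for strings)
  let fl : List Char := PySem.Chars.lower (if flt == "" then "" else flt).toList
  (pvDfsA g fl (pvFuelA g start) (PySem.Set.empty, PySem.Dict.empty) start).2.items

-- ===== PORT B =====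
-- total number of neighbour entries in g (bounds the pushes per visited node)
def pvE (g : List (String × List String)) : Nat :=
  (g.map (fun p => p.2.length)).sum

-- fuel = 1 + |univ| * (1 + E) strictly exceeds the number of loop iterations
-- (each pop consumes one, pops ≤ initial stack + pushes)
def pvFuelB (g : List (String × List String)) (start : String) : Nat :=
  1 + (pvUniv g start).length * (1 + pvE g)

-- B's while-loop; the Lean stack keeps its top at the HEAD (Python pushes/pops at the
-- right end and extends with reversed(survivors), which is exactly 'survivors ++ stack')
def pvLoopB (g : List (String × List String)) (fl : List Char) :
    Nat → PySem.Set String → PySem.Dict String (List String) → List String →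
    PySem.Dict String (List String)
  | 0, _, out, _ => out
  | _+1, _, out, [] => out
  | n+1, vis, out, u :: stack =>
    if PySem.Set.contains vis u then pvLoopB g fl n vis out stack
    else
      let survivors := (pvAdj g u).filter (fun v => !pvMatch fl v)
      if survivors.isEmpty then pvLoopB g fl n (PySem.Set.add vis u) out stack
      else
        pvLoopB g fl n (PySem.Set.add vis u)
          (PySem.Dict.modify out u [] (fun s => PySem.Set.update s survivors))
          (survivors ++ stack)

def dfs_prune_by_filter_alt (g : List (String × List String)) (start : String) (flt : String) :
    List (String × List String) :=
  let fl : List Char := PySem.Chars.lower (if flt == "" then "" else flt).toList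
  if pvMatch fl start then []
  else (pvLoopB g fl (pvFuelB g start) PySem.Set.empty PySem.Dict.empty [start]).items

-- ===== PRECONDITION & SPEC =====
def Spec_dfs_prune_by_filter (g : List (String × List String)) (start : String) (flt : String) (out : List (String × List String)) : Prop := out = dfs_prune_by_filter_alt g start flt
instance (g : List (String × List String)) (start : String) (flt : String) (out : List (String × List String)) : Decidable (Spec_dfs_prune_by_filter g start flt out) := by unfold Spec_dfs_prune_by_filter; infer_instance

-- ===== CLAIM (what is proved, stated in full; the proofs are below) =====
def Claim_equal_dfs_prune_by_filter : Prop := ∀ (g : List (String × List String)) (start : String) (flt : String), Dom_dfs_prune_by_filter g start flt → Spec_dfs_prune_by_filter g start flt (dfs_prune_by_filter g start flt)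

-- ===== LEMMAS AND PROOFS =====

-- trace mirror of pvDfsA: same recursion, but records the edge writes ((u,v) pairs, in
-- order) instead of performing them, so 'visited' and the write trace are manifestly
-- independent of the output dict
def pvDfsT (g : List (String × List String)) (fl : List Char) :
    Nat → PySem.Set String → String → PySem.Set String × List (String × String)
  | 0, vis, _ => (vis, [])
  | n+1, vis, u =>
    if PySem.Set.contains vis u then (vis, [])
    else if pvMatch fl u then (vis, [])
    else
      (pvAdj g u).foldl
        (fun st v =>
          if pvMatch fl v then st
          else
            let r := pvDfsT g fl n st.1 v
            (r.1, st.2 ++ (u, v) :: r.2))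
        (PySem.Set.add vis u, [])

def pvApply (out : PySem.Dict String (List String)) (tr : List (String × String)) :
    PySem.Dict String (List String) :=
  tr.foldl (fun d e => pvAddE d e.1 e.2) out

-- one-step unfolding of the two recursions (definitional)
theorem pvDfsA_succ (g : List (String × List String)) (fl : List Char) (n : Nat)
    (st : PySem.Set String × PySem.Dict String (List String)) (u : String) :
    pvDfsA g fl (n+1) st u
      = if PySem.Set.contains st.1 u = true then st
        else if pvMatch fl u = true then st
        else
          (pvAdj g u).foldl
            (fun st' v =>
              if pvMatch fl v then st'
              else pvDfsA g fl n (st'.1, pvAddE st'.2 u v) v)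
            (PySem.Set.add st.1 u, st.2) := rfl

theorem pvDfsT_succ (g : List (String × List String)) (fl : List Char) (n : Nat)
    (vis : PySem.Set String) (u : String) :
    pvDfsT g fl (n+1) vis u
      = if PySem.Set.contains vis u = true then (vis, [])
        else if pvMatch fl u = true then (vis, [])
        else
          (pvAdj g u).foldl
            (fun st v =>
              if pvMatch fl v then st
              else
                let r := pvDfsT g fl n st.1 v
                (r.1, st.2 ++ (u, v) :: r.2))
            (PySem.Set.add vis u, []) := rfl

-- --- basic Dict facts ---

theorem pv_contains_addE (d : PySem.Dict String (List String)) (u v x : String) :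
    (pvAddE d u v).contains x = (x == u || d.contains x) := by
  exact PySem.Dict.contains_modify d u x [] _

theorem pv_insert_insert_same (d : PySem.Dict String (List String)) (u : String)
    (a b : List String) : (d.insert u a).insert u b = d.insert u b := by
  apply PySem.Dict.ext
  by_cases h : d.contains u = true
  · rw [PySem.Dict.items_insert_of_contains _ _ h,
      PySem.Dict.items_insert_of_contains _ _ (by simp),
      PySem.Dict.items_insert_of_contains _ _ h, List.map_map]
    refine List.map_congr_left ?_
    intro p _; by_cases hp : p.1 = u <;> simp [hp]
  · have hf : d.contains u = false := by simpa using h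
    have h2 : (d.insert u a).contains u = true := by simp
    rw [PySem.Dict.items_insert_of_contains _ _ h2,
      PySem.Dict.items_insert_of_not_contains _ _ hf,
      PySem.Dict.items_insert_of_not_contains _ _ hf, List.map_append]
    have hne : ∀ p ∈ d.items, ¬(p.1 == u) = true := by
      intro p hp hpu
      exact h (List.any_eq_true.mpr ⟨p, hp, hpu⟩)
    have hid : d.items.map (fun p => if (p.1 == u) = true then (u, b) else p) = d.items := by
      refine (List.map_congr_left ?_).trans (List.map_id _)
      intro p hp; simp [hne p hp]
    rw [hid]; simp

theorem pv_insert_comm (d : PySem.Dict String (List String)) (u k : String)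
    (x y : List String) (hcu : d.contains u = true) (hne : k ≠ u) :
    (d.insert u x).insert k y = (d.insert k y).insert u x := by
  apply PySem.Dict.ext
  have hcu' : (d.insert k y).contains u = true := by
    rw [PySem.Dict.contains_insert]; simp [hcu]
  by_cases hk : d.contains k = true
  · have hk' : (d.insert u x).contains k = true := by
      rw [PySem.Dict.contains_insert]; simp [hk]
    rw [PySem.Dict.items_insert_of_contains _ _ hk',
      PySem.Dict.items_insert_of_contains _ _ hcu,
      PySem.Dict.items_insert_of_contains _ _ hcu',
      PySem.Dict.items_insert_of_contains _ _ hk, List.map_map, List.map_map]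
    refine List.map_congr_left ?_
    intro p _
    by_cases hpu : p.1 = u
    · simp [hpu, show u ≠ k from fun h => hne h.symm]
    · by_cases hpk : p.1 = k
      · simp [hpk, hne]
      · simp [hpu, hpk]
  · have hk' : (d.insert u x).contains k = false := by
      rw [PySem.Dict.contains_insert]
      have h1 : ¬((k : String) == u) = true := by
        simp only [beq_iff_eq]; exact hne
      simp only [Bool.or_eq_false_iff]
      exact ⟨by simp [h1], by simpa using hk⟩
    rw [PySem.Dict.items_insert_of_not_contains _ _ hk',
      PySem.Dict.items_insert_of_contains _ _ hcu,
      PySem.Dict.items_insert_of_contains _ _ hcu',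
      PySem.Dict.items_insert_of_not_contains _ _ (by simpa using hk), List.map_append]
    have : [(k, y)].map (fun p => if (p.1 == u) = true then (u, x) else p) = [(k, y)] := by
      simp [fun h : k = u => hne h]
    rw [this]

theorem pv_addE_comm (d : PySem.Dict String (List String)) (u k v w : String)
    (hcu : d.contains u = true) (hne : k ≠ u) :
    pvAddE (pvAddE d u v) k w = pvAddE (pvAddE d k w) u v := by
  have h1 : (pvAddE d u v).getD k [] = d.getD k [] :=
    PySem.Dict.getD_modify_of_ne _ _ _ hne
  have h2 : (pvAddE d k w).getD u [] = d.getD u [] :=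
    PySem.Dict.getD_modify_of_ne _ _ _ (Ne.symm hne)
  show PySem.Dict.modify (pvAddE d u v) k [] _ = PySem.Dict.modify (pvAddE d k w) u [] _
  unfold PySem.Dict.modify
  rw [h1, h2]
  unfold pvAddE PySem.Dict.modify
  exact pv_insert_comm _ _ _ _ _ hcu hne

theorem pv_modify_modify (d : PySem.Dict String (List String)) (u : String)
    (f gf : List String → List String) :
    PySem.Dict.modify (PySem.Dict.modify d u [] gf) u [] f
      = PySem.Dict.modify d u [] (fun t => f (gf t)) := by
  unfold PySem.Dict.modify
  rw [PySem.Dict.getD_insert_self, pv_insert_insert_same]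

-- batched update = the sequence of single adds A performs
theorem pv_batch_foldl (u : String) (vs : List String)
    (f : List String → List String) (d : PySem.Dict String (List String)) :
    vs.foldl (fun d' v => pvAddE d' u v) (PySem.Dict.modify d u [] f)
      = PySem.Dict.modify d u [] (fun t => PySem.Set.update (f t) vs) := by
  induction vs generalizing f with
  | nil => simp [PySem.Set.update]
  | cons w ws ih =>
    show ws.foldl _ (pvAddE (PySem.Dict.modify d u [] f) u w) = _
    have h1 : pvAddE (PySem.Dict.modify d u [] f) u w
        = PySem.Dict.modify d u [] (fun t => PySem.Set.add (f t) w) :=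
      pv_modify_modify d u _ f
    rw [h1, ih (fun t => PySem.Set.add (f t) w)]
    simp [PySem.Set.update_cons]

theorem pv_batch_eq_addEs (u : String) (v : String) (vs : List String)
    (d : PySem.Dict String (List String)) :
    PySem.Dict.modify d u [] (fun s => PySem.Set.update s (v :: vs))
      = (v :: vs).foldl (fun d' w => pvAddE d' u w) d := by
  show _ = vs.foldl (fun d' w => pvAddE d' u w) (pvAddE d u v)
  rw [show pvAddE d u v = PySem.Dict.modify d u [] (fun s => PySem.Set.add s v) from rfl,
    pv_batch_foldl]
  simp [PySem.Set.update_cons]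

-- an addE at a key u already present commutes with a trace none of whose keys is u
theorem pv_apply_addE_comm (u v : String) (tr : List (String × String))
    (d : PySem.Dict String (List String)) (hcu : d.contains u = true)
    (htr : ∀ e ∈ tr, e.1 ≠ u) :
    pvApply (pvAddE d u v) tr = pvAddE (pvApply d tr) u v := by
  induction tr generalizing d with
  | nil => rfl
  | cons e es ih =>
    show pvApply (pvAddE (pvAddE d u v) e.1 e.2) es = _
    rw [pv_addE_comm d u e.1 v e.2 hcu (htr e (by simp))]
    have hcu' : (pvAddE d e.1 e.2).contains u = true := by
      rw [pv_contains_addE]; simp [hcu]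
    rw [ih _ hcu' (fun e' he' => htr e' (by simp [he']))]
    rfl

theorem pv_apply_addEs_comm (u : String) (vs : List String) (tr : List (String × String))
    (d : PySem.Dict String (List String)) (hcu : d.contains u = true)
    (htr : ∀ e ∈ tr, e.1 ≠ u) :
    vs.foldl (fun d' w => pvAddE d' u w) (pvApply d tr)
      = pvApply (vs.foldl (fun d' w => pvAddE d' u w) d) tr := by
  induction vs generalizing d with
  | nil => rfl
  | cons w ws ih =>
    show ws.foldl _ (pvAddE (pvApply d tr) u w) = _
    rw [← pv_apply_addE_comm u w tr d hcu htr]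
    exact ih _ (by rw [pv_contains_addE]; simp [hcu])

theorem pv_apply_append (d : PySem.Dict String (List String))
    (t1 t2 : List (String × String)) :
    pvApply d (t1 ++ t2) = pvApply (pvApply d t1) t2 := by
  simp [pvApply, List.foldl_append]

-- --- the trace mirror is exact (visited and the writes of pvDfsA) ---

theorem pvDfsA_eq_T (g : List (String × List String)) (fl : List Char) (n : Nat)
    (vis : PySem.Set String) (out : PySem.Dict String (List String)) (u : String) :
    pvDfsA g fl n (vis, out) u
      = ((pvDfsT g fl n vis u).1, pvApply out (pvDfsT g fl n vis u).2) := by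
  induction n generalizing vis out u with
  | zero => rfl
  | succ n ih =>
    rw [pvDfsA_succ, pvDfsT_succ]
    by_cases h1 : PySem.Set.contains vis u = true
    · rw [if_pos h1, if_pos h1]; rfl
    · by_cases h2 : pvMatch fl u = true
      · rw [if_neg h1, if_neg h1, if_pos h2, if_pos h2]; rfl
      · rw [if_neg h1, if_neg h1, if_neg h2, if_neg h2]
        have key : ∀ (ns : List String) (p : PySem.Set String × List (String × String)),
            ns.foldl
                (fun st' v => if pvMatch fl v then st'
                  else pvDfsA g fl n (st'.1, pvAddE st'.2 u v) v)
                (p.1, pvApply out p.2)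
              = ((ns.foldl
                    (fun st v => if pvMatch fl v then st
                      else
                        let r := pvDfsT g fl n st.1 v
                        (r.1, st.2 ++ (u, v) :: r.2)) p).1,
                 pvApply out
                   (ns.foldl
                    (fun st v => if pvMatch fl v then st
                      else
                        let r := pvDfsT g fl n st.1 v
                        (r.1, st.2 ++ (u, v) :: r.2)) p).2) := by
          intro ns
          induction ns with
          | nil => intro p; rfl
          | cons v vs ihn =>
            intro p
            by_cases hv : pvMatch fl v = true
            · simpa [hv] using ihn p
            · simp only [List.foldl_cons, hv, Bool.false_eq_true, if_false]
              have e1 : pvAddE (pvApply out p.2) u v = pvApply out (p.2 ++ [(u, v)]) := by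
                rw [pv_apply_append]; rfl
              rw [e1, ih]
              have e2 : pvApply (pvApply out (p.2 ++ [(u, v)]))
                    (pvDfsT g fl n p.1 v).2
                  = pvApply out (p.2 ++ (u, v) :: (pvDfsT g fl n p.1 v).2) := by
                rw [← pv_apply_append]; simp
              rw [e2]
              exact ihn ((pvDfsT g fl n p.1 v).1, p.2 ++ (u, v) :: (pvDfsT g fl n p.1 v).2)
        have := key (pvAdj g u) (PySem.Set.add vis u, [])
        simpa [pvApply] using this

-- visited only grows, and every trace key was unvisited at entry
theorem pvDfsT_mono_keys (g : List (String × List String)) (fl : List Char) (n : Nat)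
    (vis : PySem.Set String) (u : String) :
    (∀ x, PySem.Set.contains vis x = true →
        PySem.Set.contains (pvDfsT g fl n vis u).1 x = true)
    ∧ (∀ e ∈ (pvDfsT g fl n vis u).2, PySem.Set.contains vis e.1 = false) := by
  induction n generalizing vis u with
  | zero => exact ⟨fun x h => h, by intro e he; simp [pvDfsT] at he⟩
  | succ n ih =>
    rw [pvDfsT_succ]
    by_cases h1 : PySem.Set.contains vis u = true
    · rw [if_pos h1]; exact ⟨fun x h => h, by intro e he; simp at he⟩
    · by_cases h2 : pvMatch fl u = true
      · rw [if_neg h1, if_pos h2]; exact ⟨fun x h => h, by intro e he; simp at he⟩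
      · rw [if_neg h1, if_neg h2]
        have key : ∀ (ns : List String) (p : PySem.Set String × List (String × String)),
            (∀ x, PySem.Set.contains vis x = true → PySem.Set.contains p.1 x = true) →
            (∀ e ∈ p.2, PySem.Set.contains vis e.1 = false) →
            (∀ x, PySem.Set.contains vis x = true →
              PySem.Set.contains
                (ns.foldl
                  (fun st v =>
                    if pvMatch fl v then st
                    else
                      let r := pvDfsT g fl n st.1 v
                      (r.1, st.2 ++ (u, v) :: r.2)) p).1 x = true)
            ∧ (∀ e ∈ (ns.foldl
                  (fun st v =>
                    if pvMatch fl v then st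
                    else
                      let r := pvDfsT g fl n st.1 v
                      (r.1, st.2 ++ (u, v) :: r.2)) p).2,
                PySem.Set.contains vis e.1 = false) := by
          intro ns
          induction ns with
          | nil => intro p hp1 hp2; exact ⟨hp1, hp2⟩
          | cons v vs ihn =>
            intro p hp1 hp2
            by_cases hv : pvMatch fl v = true
            · simpa [hv] using ihn p hp1 hp2
            · simp only [List.foldl_cons, hv, Bool.false_eq_true, if_false]
              refine ihn _ ?_ ?_
              · intro x hx
                exact (ih p.1 v).1 x (hp1 x hx)
              · intro e he
                simp only [List.mem_append, List.mem_cons] at he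
                rcases he with he | he | he
                · exact hp2 e he
                · subst he
                  exact Bool.eq_false_iff.mpr h1
                · by_contra hcon
                  have hev : PySem.Set.contains vis e.1 = true := by
                    cases hb : PySem.Set.contains vis e.1
                    · exact absurd hb hcon
                    · rfl
                  have := (ih p.1 v).2 e he
                  rw [hp1 e.1 hev] at this
                  exact Bool.true_eq_false.mp this
        refine key (pvAdj g u) (PySem.Set.add vis u, []) ?_ ?_
        · intro x hx
          rw [PySem.Set.contains_iff] at hx ⊢
          exact (PySem.Set.mem_add vis u x).mpr (Or.inl hx)
        · intro e he; simp at he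

-- --- per-node reordering: A's interleaved edge-writes + recursions equal B's batch ---

theorem pv_core (g : List (String × List String)) (fl : List Char) (n : Nat) (u : String) :
    ∀ (ns : List String) (vis : PySem.Set String)
      (out : PySem.Dict String (List String)),
      PySem.Set.contains vis u = true →
      ns.foldl
          (fun st' v =>
            if pvMatch fl v then st'
            else pvDfsA g fl n (st'.1, pvAddE st'.2 u v) v)
          (vis, out)
        = (ns.filter (fun v => !pvMatch fl v)).foldl
            (fun st v => pvDfsA g fl n st v)
            (vis, (ns.filter (fun v => !pvMatch fl v)).foldl
                    (fun d' w => pvAddE d' u w) out) := by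
  intro ns
  induction ns with
  | nil => intro vis out _; rfl
  | cons v vs ihn =>
    intro vis out hvisu
    by_cases hv : pvMatch fl v = true
    · have hf : (List.filter (fun v => !pvMatch fl v) (v :: vs))
          = vs.filter (fun v => !pvMatch fl v) :=
        List.filter_cons_of_neg (by simp [hv])
      rw [hf, List.foldl_cons, if_pos hv]
      exact ihn vis out hvisu
    · have hf : (List.filter (fun v => !pvMatch fl v) (v :: vs))
          = v :: vs.filter (fun v => !pvMatch fl v) :=
        List.filter_cons_of_pos (by simp [hv])
      have hkeys : ∀ e ∈ (pvDfsT g fl n vis v).2, e.1 ≠ u := by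
        intro e he heq
        have := (pvDfsT_mono_keys g fl n vis v).2 e he
        rw [heq, hvisu] at this
        exact Bool.true_eq_false.mp this
      have hcu1 : (pvAddE out u v).contains u = true := by
        rw [pv_contains_addE]; simp
      rw [hf, List.foldl_cons, List.foldl_cons, if_neg hv]
      rw [pvDfsA_eq_T, pvDfsA_eq_T]
      rw [ihn _ _ ((pvDfsT_mono_keys g fl n vis v).1 u hvisu)]
      rw [pv_apply_addEs_comm u _ _ _ hcu1 hkeys]
      rfl

-- --- universe / adjacency bounds ---

theorem pv_adj_sub (g : List (String × List String)) (u v : String)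
    (h : v ∈ pvAdj g u) : v ∈ g.flatMap (fun p => p.2) := by
  induction g with
  | nil => simp [pvAdj, PySem.Dict.getD, PySem.Dict.get?] at h
  | cons p rest ih =>
    obtain ⟨k, vs⟩ := p
    have hstep : pvAdj ((k, vs) :: rest) u = if k == u then vs else pvAdj rest u := by
      simp only [pvAdj, PySem.Dict.getD, PySem.Dict.get?_mk_cons]
      split <;> rfl
    rw [hstep] at h
    by_cases hk : (k == u) = true
    · rw [if_pos hk] at h
      exact List.mem_flatMap.mpr ⟨(k, vs), List.mem_cons_self, h⟩
    · rw [if_neg hk] at h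
      have := ih h
      simp only [List.flatMap_cons, List.mem_append]
      exact Or.inr (by simpa [List.mem_flatMap] using this)

theorem pv_adj_len (g : List (String × List String)) (u : String) :
    (pvAdj g u).length ≤ pvE g := by
  induction g with
  | nil => simp [pvAdj, PySem.Dict.getD, PySem.Dict.get?, pvE]
  | cons p rest ih =>
    obtain ⟨k, vs⟩ := p
    have hstep : pvAdj ((k, vs) :: rest) u = if k == u then vs else pvAdj rest u := by
      simp only [pvAdj, PySem.Dict.getD, PySem.Dict.get?_mk_cons]
      split <;> rfl
    have hE : pvE ((k, vs) :: rest) = vs.length + pvE rest := by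
      simp [pvE]
    rw [hstep, hE]
    by_cases hk : (k == u) = true
    · rw [if_pos hk]; omega
    · rw [if_neg hk]; omega

theorem pv_adj_univ (g : List (String × List String)) (start u v : String)
    (h : v ∈ pvAdj g u) : v ∈ pvUniv g start := by
  unfold pvUniv
  rw [PySem.Set.mem_ofList]
  exact List.mem_cons_of_mem _ (pv_adj_sub g u v h)

-- --- counting unvisited universe nodes ---

def pvUnvis (U : List String) (vis : PySem.Set String) : Nat :=
  (U.filter (fun x => !PySem.Set.contains vis x)).length

theorem pvUnvis_le (U : List String) (vis : PySem.Set String) :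
    pvUnvis U vis ≤ U.length :=
  List.length_filter_le _ _

theorem pvUnvis_anti (U : List String) (vis vis' : PySem.Set String)
    (h : ∀ x, PySem.Set.contains vis x = true → PySem.Set.contains vis' x = true) :
    pvUnvis U vis' ≤ pvUnvis U vis := by
  have hmono : ∀ x ∈ U, (!PySem.Set.contains vis' x) = true →
      (!PySem.Set.contains vis x) = true := by
    intro x _ hp
    cases hb : PySem.Set.contains vis x
    · rfl
    · rw [h x hb] at hp; simp at hp
  simpa [pvUnvis, ← List.countP_eq_length_filter] using List.countP_mono_left hmono

theorem pvUnvis_add_lt (U : List String) (vis : PySem.Set String) (u : String)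
    (hu : u ∈ U) (hv : PySem.Set.contains vis u = false) :
    pvUnvis U (PySem.Set.add vis u) < pvUnvis U vis := by
  have hc : ∀ x ∈ U, (!PySem.Set.contains (PySem.Set.add vis u) x)
      = (!(x == u) && !PySem.Set.contains vis x) := by
    intro x _
    have haux : PySem.Set.contains (PySem.Set.add vis u) x
        = (PySem.Set.contains vis x || x == u) := by
      rw [Bool.eq_iff_iff]
      simp [PySem.Set.mem_add]
    rw [haux, Bool.not_or, Bool.and_comm]
  unfold pvUnvis
  rw [List.filter_congr hc, ← List.filter_filter]
  refine List.length_filter_lt_length_iff_exists.mpr ⟨u, ?_, by simp⟩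
  exact List.mem_filter.mpr ⟨hu, by rw [hv]; rfl⟩

-- visited only grows through pvDfsA; a visited u is a no-op
theorem pvDfsA_vis_mono (g : List (String × List String)) (fl : List Char) (n : Nat)
    (vis : PySem.Set String) (out : PySem.Dict String (List String)) (u x : String)
    (hx : PySem.Set.contains vis x = true) :
    PySem.Set.contains (pvDfsA g fl n (vis, out) u).1 x = true := by
  rw [pvDfsA_eq_T]
  exact (pvDfsT_mono_keys g fl n vis u).1 x hx

theorem pvDfsA_visited (g : List (String × List String)) (fl : List Char) (n : Nat)
    (vis : PySem.Set String) (out : PySem.Dict String (List String)) (u : String)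
    (h : PySem.Set.contains vis u = true) :
    pvDfsA g fl n (vis, out) u = (vis, out) := by
  cases n with
  | zero => rfl
  | succ n => rw [pvDfsA_succ, if_pos h]

-- --- fuel irrelevance for pvDfsA once the fuel exceeds the unvisited count ---

theorem pvDfsA_fuel (g : List (String × List String)) (fl : List Char) (start : String) :
    ∀ (k n m : Nat) (vis : PySem.Set String) (out : PySem.Dict String (List String))
      (u : String), u ∈ pvUniv g start →
      pvUnvis (pvUniv g start) vis ≤ k →
      pvUnvis (pvUniv g start) vis < n → pvUnvis (pvUniv g start) vis < m →
      pvDfsA g fl n (vis, out) u = pvDfsA g fl m (vis, out) u := by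
  intro k
  induction k with
  | zero =>
    intro n m vis out u hU hk hn hm
    cases n with
    | zero => omega
    | succ n' =>
      cases m with
      | zero => omega
      | succ m' =>
        rw [pvDfsA_succ, pvDfsA_succ]
        by_cases h1 : PySem.Set.contains vis u = true
        · rw [if_pos h1, if_pos h1]
        · exfalso
          have hmem : u ∈ (pvUniv g start).filter
              (fun x => !PySem.Set.contains vis x) :=
            List.mem_filter.mpr ⟨hU, by rw [Bool.eq_false_iff.mpr h1]; rfl⟩
          have := List.length_pos_of_mem hmem
          unfold pvUnvis at hk
          omega
  | succ k ihk =>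
    intro n m vis out u hU hk hn hm
    cases n with
    | zero => omega
    | succ n' =>
      cases m with
      | zero => omega
      | succ m' =>
        rw [pvDfsA_succ, pvDfsA_succ]
        by_cases h1 : PySem.Set.contains vis u = true
        · rw [if_pos h1, if_pos h1]
        · rw [if_neg h1, if_neg h1]
          by_cases h2 : pvMatch fl u = true
          · rw [if_pos h2, if_pos h2]
          · rw [if_neg h2, if_neg h2]
            have hadd_lt : pvUnvis (pvUniv g start) (PySem.Set.add vis u)
                < pvUnvis (pvUniv g start) vis :=
              pvUnvis_add_lt _ _ _ hU (Bool.eq_false_iff.mpr h1)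
            have key : ∀ (ns : List String)
                (st : PySem.Set String × PySem.Dict String (List String)),
                (∀ v ∈ ns, v ∈ pvUniv g start) →
                (∀ x, PySem.Set.contains (PySem.Set.add vis u) x = true →
                  PySem.Set.contains st.1 x = true) →
                ns.foldl
                  (fun st' v => if pvMatch fl v then st'
                    else pvDfsA g fl n' (st'.1, pvAddE st'.2 u v) v) st
                = ns.foldl
                  (fun st' v => if pvMatch fl v then st'
                    else pvDfsA g fl m' (st'.1, pvAddE st'.2 u v) v) st := by
              intro ns
              induction ns with
              | nil => intro st _ _; rfl
              | cons v vs ihn =>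
                intro st hns hst
                by_cases hv : pvMatch fl v = true
                · simp only [List.foldl_cons, hv, if_true]
                  exact ihn st (fun w hw => hns w (List.mem_cons_of_mem _ hw)) hst
                · simp only [List.foldl_cons, hv, Bool.false_eq_true, if_false]
                  have hle : pvUnvis (pvUniv g start) st.1
                      ≤ pvUnvis (pvUniv g start) (PySem.Set.add vis u) :=
                    pvUnvis_anti _ _ _ hst
                  have hhead : pvDfsA g fl n' (st.1, pvAddE st.2 u v) v
                      = pvDfsA g fl m' (st.1, pvAddE st.2 u v) v := by
                    refine ihk n' m' st.1 _ v (hns v List.mem_cons_self) ?_ ?_ ?_ <;> omega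
                  rw [hhead]
                  refine ihn _ (fun w hw => hns w (List.mem_cons_of_mem _ hw)) ?_
                  intro x hx
                  exact pvDfsA_vis_mono g fl m' st.1 _ v x (hst x hx)
            exact key (pvAdj g u) (PySem.Set.add vis u, out)
              (fun v hv => pv_adj_univ g start u v hv) (fun x hx => hx)

theorem pv_foldl_fuel (g : List (String × List String)) (fl : List Char) (start : String)
    (n m : Nat) :
    ∀ (l : List String) (st : PySem.Set String × PySem.Dict String (List String)),
      (∀ v ∈ l, v ∈ pvUniv g start) →
      pvUnvis (pvUniv g start) st.1 < n → pvUnvis (pvUniv g start) st.1 < m →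
      l.foldl (fun st' v => pvDfsA g fl n st' v) st
        = l.foldl (fun st' v => pvDfsA g fl m st' v) st := by
  intro l
  induction l with
  | nil => intro st _ _ _; rfl
  | cons v vs ih =>
    intro st hl hn hm
    simp only [List.foldl_cons]
    have hhead : pvDfsA g fl n st v = pvDfsA g fl m st v := by
      obtain ⟨vis, out⟩ := st
      exact pvDfsA_fuel g fl start (pvUnvis (pvUniv g start) vis) n m vis out v
        (hl v List.mem_cons_self) le_rfl hn hm
    rw [hhead]
    refine ih _ (fun w hw => hl w (List.mem_cons_of_mem _ hw)) ?_ ?_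
    · calc pvUnvis (pvUniv g start) (pvDfsA g fl m st v).1
          ≤ pvUnvis (pvUniv g start) st.1 := by
            refine pvUnvis_anti _ _ _ ?_
            intro x hx
            obtain ⟨vis, out⟩ := st
            exact pvDfsA_vis_mono g fl m vis out v x hx
        _ < n := hn
    · calc pvUnvis (pvUniv g start) (pvDfsA g fl m st v).1
          ≤ pvUnvis (pvUniv g start) st.1 := by
            refine pvUnvis_anti _ _ _ ?_
            intro x hx
            obtain ⟨vis, out⟩ := st
            exact pvDfsA_vis_mono g fl m vis out v x hx
        _ < m := hm

-- one-step unfolding of B's loop (definitional)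
theorem pvLoopB_cons (g : List (String × List String)) (fl : List Char) (n : Nat)
    (vis : PySem.Set String) (out : PySem.Dict String (List String))
    (u : String) (stack : List String) :
    pvLoopB g fl (n+1) vis out (u :: stack)
      = if PySem.Set.contains vis u = true then pvLoopB g fl n vis out stack
        else if ((pvAdj g u).filter (fun v => !pvMatch fl v)).isEmpty then
          pvLoopB g fl n (PySem.Set.add vis u) out stack
        else
          pvLoopB g fl n (PySem.Set.add vis u)
            (PySem.Dict.modify out u []
              (fun s => PySem.Set.update s ((pvAdj g u).filter (fun v => !pvMatch fl v))))
            (((pvAdj g u).filter (fun v => !pvMatch fl v)) ++ stack) := rfl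

-- --- the simulation: B's stack loop computes A's fold over the stack ---

theorem pv_sim (g : List (String × List String)) (fl : List Char) (start : String)
    (n : Nat) (hn : (pvUniv g start).length < n) :
    ∀ (m : Nat) (stack : List String) (vis : PySem.Set String)
      (out : PySem.Dict String (List String)),
      (∀ u ∈ stack, u ∈ pvUniv g start) →
      (∀ u ∈ stack, pvMatch fl u = false) →
      stack.length + pvUnvis (pvUniv g start) vis * (1 + pvE g) ≤ m →
      pvLoopB g fl m vis out stack
        = (stack.foldl (fun st u => pvDfsA g fl n st u) (vis, out)).2 := by
  intro m
  induction m with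
  | zero =>
    intro stack vis out _ _ hm
    have : stack = [] := List.eq_nil_of_length_eq_zero (by omega)
    subst this
    rfl
  | succ m ihm =>
    intro stack vis out hU hM hm
    cases stack with
    | nil => rfl
    | cons u rest =>
      rw [pvLoopB_cons, List.foldl_cons]
      by_cases hc : PySem.Set.contains vis u = true
      · rw [if_pos hc, pvDfsA_visited g fl n vis out u hc]
        refine ihm rest vis out (fun w hw => hU w (List.mem_cons_of_mem _ hw))
          (fun w hw => hM w (List.mem_cons_of_mem _ hw)) ?_
        simp only [List.length_cons] at hm
        omega
      · rw [if_neg hc]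
        have hm1 : pvMatch fl u = false := hM u List.mem_cons_self
        have hUu : u ∈ pvUniv g start := hU u List.mem_cons_self
        have haddlt : pvUnvis (pvUniv g start) (PySem.Set.add vis u)
            < pvUnvis (pvUniv g start) vis :=
          pvUnvis_add_lt _ _ _ hUu (Bool.eq_false_iff.mpr hc)
        have hub : pvUnvis (pvUniv g start) vis ≤ (pvUniv g start).length :=
          pvUnvis_le _ _
        cases n with
        | zero => omega
        | succ n' =>
          -- unfold A's call on u and reorder it into B's batched shape
          have hcadd : PySem.Set.contains (PySem.Set.add vis u) u = true := by
            rw [PySem.Set.contains_iff]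
            exact (PySem.Set.mem_add vis u u).mpr (Or.inr rfl)
          have hA : pvDfsA g fl (n'+1) (vis, out) u
              = ((pvAdj g u).filter (fun v => !pvMatch fl v)).foldl
                  (fun st v => pvDfsA g fl (n'+1) st v)
                  (PySem.Set.add vis u,
                    ((pvAdj g u).filter (fun v => !pvMatch fl v)).foldl
                      (fun d' w => pvAddE d' u w) out) := by
            rw [pvDfsA_succ, if_neg hc, if_neg (by rw [hm1]; simp)]
            rw [pv_core g fl n' u (pvAdj g u) (PySem.Set.add vis u) out hcadd]
            refine pv_foldl_fuel g fl start n' (n'+1) _ _ ?_ ?_ ?_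
            · intro w hw
              exact pv_adj_univ g start u w (List.mem_filter.mp hw).1
            · show pvUnvis (pvUniv g start) (PySem.Set.add vis u) < n'
              omega
            · show pvUnvis (pvUniv g start) (PySem.Set.add vis u) < n' + 1
              omega
          rw [hA, ← List.foldl_append]
          have hFU : ∀ w ∈ ((pvAdj g u).filter (fun v => !pvMatch fl v)) ++ rest,
              w ∈ pvUniv g start := by
            intro w hw
            rcases List.mem_append.mp hw with hw | hw
            · exact pv_adj_univ g start u w (List.mem_filter.mp hw).1
            · exact hU w (List.mem_cons_of_mem _ hw)
          have hFM : ∀ w ∈ ((pvAdj g u).filter (fun v => !pvMatch fl v)) ++ rest,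
              pvMatch fl w = false := by
            intro w hw
            rcases List.mem_append.mp hw with hw | hw
            · have := (List.mem_filter.mp hw).2
              simpa using this
            · exact hM w (List.mem_cons_of_mem _ hw)
          have hFlen : ((pvAdj g u).filter (fun v => !pvMatch fl v)).length ≤ pvE g :=
            le_trans (List.length_filter_le _ _) (pv_adj_len g u)
          have hmB : (((pvAdj g u).filter (fun v => !pvMatch fl v)) ++ rest).length
              + pvUnvis (pvUniv g start) (PySem.Set.add vis u) * (1 + pvE g) ≤ m := by
            have hmul : (pvUnvis (pvUniv g start) (PySem.Set.add vis u) + 1) * (1 + pvE g)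
                ≤ pvUnvis (pvUniv g start) vis * (1 + pvE g) :=
              Nat.mul_le_mul_right _ (by omega)
            have hexp : (pvUnvis (pvUniv g start) (PySem.Set.add vis u) + 1) * (1 + pvE g)
                = pvUnvis (pvUniv g start) (PySem.Set.add vis u) * (1 + pvE g)
                  + (1 + pvE g) := by ring
            simp only [List.length_append, List.length_cons] at hm ⊢
            omega
          by_cases hE : ((pvAdj g u).filter (fun v => !pvMatch fl v)).isEmpty = true
          · rw [if_pos hE]
            have hFnil : (pvAdj g u).filter (fun v => !pvMatch fl v) = [] :=
              List.isEmpty_iff.mp hE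
            rw [hFnil] at hmB ⊢
            simp only [List.nil_append] at hmB ⊢
            exact ihm rest (PySem.Set.add vis u) out
              (fun w hw => hU w (List.mem_cons_of_mem _ hw))
              (fun w hw => hM w (List.mem_cons_of_mem _ hw)) hmB
          · rw [if_neg hE]
            obtain ⟨f0, ftl, hFcons⟩ : ∃ f0 ftl,
                (pvAdj g u).filter (fun v => !pvMatch fl v) = f0 :: ftl := by
              cases hF : (pvAdj g u).filter (fun v => !pvMatch fl v) with
              | nil => rw [hF] at hE; simp at hE
              | cons a b => exact ⟨a, b, rfl⟩
            have hbatch : PySem.Dict.modify out u []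
                (fun s => PySem.Set.update s ((pvAdj g u).filter (fun v => !pvMatch fl v)))
                = ((pvAdj g u).filter (fun v => !pvMatch fl v)).foldl
                    (fun d' w => pvAddE d' u w) out := by
              rw [hFcons]
              exact pv_batch_eq_addEs u f0 ftl out
            rw [hbatch]
            exact ihm _ _ _ hFU hFM hmB

-- ===== VERDICT (by name: the statement is the Claim_ definition above) =====
theorem dfs_prune_by_filter_spec : Claim_equal_dfs_prune_by_filter := by
  intro g start flt _
  unfold Spec_dfs_prune_by_filter
  simp only [dfs_prune_by_filter, dfs_prune_by_filter_alt]
  by_cases hms : pvMatch (PySem.Chars.lower (if flt == "" then "" else flt).toList) start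
      = true
  · rw [if_pos hms]
    unfold pvFuelA
    have hce : PySem.Set.contains PySem.Set.empty start = false := rfl
    rw [pvDfsA_succ]
    rw [if_neg (by rw [hce]; simp)]
    rw [if_pos hms]
    rfl
  · rw [if_neg hms]
    have hsim := pv_sim g (PySem.Chars.lower (if flt == "" then "" else flt).toList) start
      (pvFuelA g start) (Nat.lt_succ_self _) (pvFuelB g start) [start]
      PySem.Set.empty PySem.Dict.empty
      (by intro w hw
          rw [List.mem_singleton] at hw
          subst hw
          unfold pvUniv
          rw [PySem.Set.mem_ofList]
          exact List.mem_cons_self)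
      (by intro w hw
          rw [List.mem_singleton] at hw
          subst hw
          exact Bool.eq_false_iff.mpr hms)
      (by show 1 + pvUnvis (pvUniv g start) PySem.Set.empty * (1 + pvE g) ≤ pvFuelB g start
          unfold pvFuelB
          exact Nat.add_le_add_left
            (Nat.mul_le_mul_right _ (pvUnvis_le (pvUniv g start) PySem.Set.empty)) 1)
    rw [hsim, List.foldl_cons, List.foldl_nil]
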